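-- pv_equiv track=rewrite | github.com/osy0602/coding_test | baekjoon/1652.py | countWidth
-- ===== SOURCE A (Python) =====
-- def countWidth(arr, N):
--     num = 0
--
--     for i in range(N):
--         counting = True
--         for j in range(1, N):
--             if counting==False and arr[i][j] == 'X':
--                 counting = True
--             if counting and arr[i][j] == '.' and arr[i][j-1] == '.':
--                 num += 1
--                 counting = False
--     return num
-- ===== SOURCE B (Python) =====
-- def countWidth(arr, N):
--     if N < 2:
--         return 0
--     total = 0
--     for row in arr[:N]:
--         segs = []
--         cur = []
--         for c in row[:N]:
--             if c == 'X':
--                 segs.append(cur)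
--                 cur = []
--             else:
--                 cur.append(c)
--         segs.append(cur)
--         for s in segs:
--             if any(a == '.' and b == '.' for a, b in zip(s, s[1:])):
--                 total += 1
--     return total
-- ===== Notes on version B (the rewrite author's own statement) =====
-- stated objective: alternative
-- what changed: Replaces A's stateful counting-flag scan over index pairs with materialising each row's X-delimited segments (split the first N cells on 'X') and counting the segments that contain an adjacent pair of '.' cells.
import Mathlib
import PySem

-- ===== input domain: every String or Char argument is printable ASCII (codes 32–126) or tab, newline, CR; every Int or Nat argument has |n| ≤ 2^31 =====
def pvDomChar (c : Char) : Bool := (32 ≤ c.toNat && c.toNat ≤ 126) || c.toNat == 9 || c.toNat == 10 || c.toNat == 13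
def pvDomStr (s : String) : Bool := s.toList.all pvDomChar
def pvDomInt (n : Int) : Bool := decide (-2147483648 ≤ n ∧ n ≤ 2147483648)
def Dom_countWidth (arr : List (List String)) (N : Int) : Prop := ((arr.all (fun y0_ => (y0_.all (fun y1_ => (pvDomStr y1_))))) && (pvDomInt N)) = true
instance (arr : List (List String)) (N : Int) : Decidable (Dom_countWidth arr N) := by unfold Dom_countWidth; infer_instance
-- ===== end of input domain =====

-- B replaces A's counting-flag pair scan by materialising each row's X-delimited segments and
-- counting segments with an adjacent '..' pair; equivalence proved on Pre_ (where A raises no IndexError).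


-- ===== PORT A =====
def countWidth (arr : List (List String)) (N : Int) : Int :=
  (PySem.List.pyRange 0 N 1).foldl
    (fun num i =>
      ((PySem.List.pyRange 1 N 1).foldl
        (fun (st : Int × Bool) j =>
          let counting :=
            if st.2 = false ∧
                (PySem.List.pyGetD (PySem.List.pyGetD arr i []) j "",
                 PySem.List.pyGetD (PySem.List.pyGetD arr i []) (j - 1) "").1 = "X" then true
            else st.2
          if counting = true ∧
              (PySem.List.pyGetD (PySem.List.pyGetD arr i []) j "",
               PySem.List.pyGetD (PySem.List.pyGetD arr i []) (j - 1) "").1 = "." ∧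
              (PySem.List.pyGetD (PySem.List.pyGetD arr i []) j "",
               PySem.List.pyGetD (PySem.List.pyGetD arr i []) (j - 1) "").2 = "." then
            (st.1 + 1, false)
          else (st.1, counting))
        (num, true)).1)
    0

-- ===== PORT B =====
-- helper of Source B's inner split loop ('if c == "X": segs.append(cur); cur = [] else: cur.append(c)')
def segStep (st : List (List String) × List String) (c : String) : List (List String) × List String :=
  if c = "X" then (st.1 ++ [st.2], []) else (st.1, st.2 ++ [c])

def segsOfRow (cells : List String) : List (List String) :=
  let p := cells.foldl segStep ([], [])
  p.1 ++ [p.2]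

-- any(a == '.' and b == '.' for a, b in zip(s, s[1:]))
def hasDotPair (s : List String) : Bool :=
  (s.zip s.tail).any (fun pr => pr.1 == "." && pr.2 == ".")

def countWidth_alt (arr : List (List String)) (N : Int) : Int :=
  if N < 2 then 0
  else
    (PySem.List.slice arr (some 0) (some N)).foldl
      (fun total row =>
        (segsOfRow (PySem.List.slice row (some 0) (some N))).foldl
          (fun t s => if hasDotPair s then t + 1 else t) total)
      0

-- ===== PRECONDITION & SPEC =====
-- Pre_ excludes exactly the inputs on which A raises IndexError: N ≥ 2 with fewer than N rows,
-- or one of the first N rows shorter than N.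
def Pre_countWidth (arr : List (List String)) (N : Int) : Prop :=
  N ≤ 1 ∨ (N ≤ (arr.length : Int) ∧ ∀ r ∈ arr.take N.toNat, N ≤ (r.length : Int))
instance (arr : List (List String)) (N : Int) : Decidable (Pre_countWidth arr N) := by
  unfold Pre_countWidth; infer_instance

def pvWitness_countWidth : List (List String) × Int := ([[".", "."], [".", "X"]], 2)

def Spec_countWidth (arr : List (List String)) (N : Int) (out : Int) : Prop := out = countWidth_alt arr N
instance (arr : List (List String)) (N : Int) (out : Int) : Decidable (Spec_countWidth arr N out) := by unfold Spec_countWidth; infer_instance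

-- ===== CLAIM (what is proved, stated in full; the proofs are below) =====
def Claim_equal_countWidth : Prop := ∀ (arr : List (List String)) (N : Int), Dom_countWidth arr N → Pre_countWidth arr N → Spec_countWidth arr N (countWidth arr N)

-- ===== LEMMAS AND PROOFS =====

-- A's inner-loop body as a step over the pair (current cell, previous cell)
def cwStep (st : Int × Bool) (pr : String × String) : Int × Bool :=
  let counting := if st.2 = false ∧ pr.1 = "X" then true else st.2
  if counting = true ∧ pr.1 = "." ∧ pr.2 = "." then (st.1 + 1, false) else (st.1, counting)

-- A's inner loop on the cells after the first, carrying the previous cell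
def gSpec : String → List String → Bool → Int
  | _, [], _ => 0
  | p, c :: cs, ct =>
    let ct' := if ct = false ∧ c = "X" then true else ct
    if ct' = true ∧ c = "." ∧ p = "." then 1 + gSpec c cs false else gSpec c cs ct'

-- reference split-on-X (front recursion)
def prependFirst (x : List String) : List (List String) → List (List String)
  | [] => [x]
  | s :: rest => (x ++ s) :: rest

def segments : List String → List (List String)
  | [] => [[]]
  | c :: cs => if c = "X" then [] :: segments cs else prependFirst [c] (segments cs)

lemma segments_ne_nil (cs : List String) : segments cs ≠ [] := by
  cases cs with
  | nil => simp [segments]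
  | cons c cs =>
    simp only [segments]
    split
    · simp
    · cases h : segments cs <;> simp [prependFirst]

lemma prependFirst_nil_of_ne (L : List (List String)) (h : L ≠ []) : prependFirst [] L = L := by
  cases L with
  | nil => exact absurd rfl h
  | cons s rest => simp [prependFirst]

lemma prependFirst_prependFirst (a b : List String) (L : List (List String)) :
    prependFirst a (prependFirst b L) = prependFirst (a ++ b) L := by
  cases L <;> simp [prependFirst]

lemma foldl_segStep (cells : List String) : ∀ (S : List (List String)) (cur : List String),
    (cells.foldl segStep (S, cur)).1 ++ [(cells.foldl segStep (S, cur)).2]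
      = S ++ prependFirst cur (segments cells) := by
  induction cells with
  | nil => intro S cur; simp [segments, prependFirst]
  | cons c cs ih =>
    intro S cur
    by_cases hc : c = "X"
    · rw [List.foldl_cons, show segStep (S, cur) c = (S ++ [cur], []) from by simp [segStep, hc],
          ih, prependFirst_nil_of_ne _ (segments_ne_nil cs),
          show segments (c :: cs) = [] :: segments cs from by simp [segments, hc]]
      simp [prependFirst]
    · rw [List.foldl_cons, show segStep (S, cur) c = (S, cur ++ [c]) from by simp [segStep, hc],
          ih, show segments (c :: cs) = prependFirst [c] (segments cs) from by simp [segments, hc],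
          prependFirst_prependFirst]

lemma segsOfRow_eq (cells : List String) : segsOfRow cells = segments cells := by
  have h := foldl_segStep cells [] []
  simpa [segsOfRow, prependFirst_nil_of_ne _ (segments_ne_nil cells)] using h

lemma hasDotPair_cons_of_not (a : String) (s : List String) (h : ¬ (s.head? = some "." ∧ a = ".")) :
    hasDotPair (a :: s) = hasDotPair s := by
  cases s with
  | nil => simp [hasDotPair]
  | cons b t =>
    simp only [hasDotPair, List.tail_cons, List.zip_cons_cons, List.any_cons]
    have : (a == "." && b == ".") = false := by
      simp only [List.head?_cons] at h
      by_cases ha : a = "." <;> by_cases hb : b = "." <;> simp_all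
    simp [this]

lemma hasDotPair_cons₂ (a b : String) (t : List String) :
    hasDotPair (a :: b :: t) = ((a == "." && b == ".") || hasDotPair (b :: t)) := by
  simp [hasDotPair]

lemma segments_head?_cons (c : String) (cs : List String) (hc : ¬ c = "X") :
    ∃ h t, segments cs = h :: t ∧ segments (c :: cs) = (c :: h) :: t := by
  obtain ⟨h, t, hht⟩ : ∃ h t, segments cs = h :: t := by
    cases hseg : segments cs with
    | nil => exact absurd hseg (segments_ne_nil cs)
    | cons h t => exact ⟨h, t, rfl⟩
  exact ⟨h, t, hht, by simp [segments, hc, hht, prependFirst]⟩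

lemma gSpec_count : ∀ (cs : List String) (p : String),
    gSpec p cs true = ((segments (p :: cs)).countP hasDotPair : Nat) ∧
    gSpec p cs false = ((((segments cs).tail).countP hasDotPair : Nat) : Int) := by
  intro cs
  induction cs with
  | nil =>
    intro p
    constructor
    · by_cases hp : p = "X"
      · simp [gSpec, segments, hp, hasDotPair, List.countP]
      · simp [gSpec, segments, hp, prependFirst, hasDotPair, List.countP]
    · simp [gSpec, segments]
  | cons c cs ih =>
    intro p
    constructor
    · -- counting = true
      by_cases hcp : c = "." ∧ p = "."
      · -- counts: current head segment has a dot pair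
        have hcX : ¬ c = "X" := by rw [hcp.1]; decide
        have hpX : ¬ p = "X" := by rw [hcp.2]; decide
        obtain ⟨h, t, hseg, hsegc⟩ := segments_head?_cons c cs hcX
        obtain ⟨h2, t2, hseg2, hsegp⟩ := segments_head?_cons p (c :: cs) hpX
        rw [hsegc] at hseg2
        cases hseg2
        have hdp : hasDotPair (p :: c :: h) = true := by
          rw [hasDotPair_cons₂]; simp [hcp.1, hcp.2]
        rw [show gSpec p (c :: cs) true = 1 + gSpec c cs false from by
              simp [gSpec, hcp.1, hcp.2]]
        rw [(ih c).2, hsegp, hseg]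
        simp only [List.countP_cons, hdp, List.tail_cons, if_true]
        push_cast
        ring
      · have hstep : gSpec p (c :: cs) true = gSpec c cs true := by
          simp only [gSpec]
          rw [if_neg (fun hh => hcp ⟨hh.2.1, hh.2.2⟩)]
          simp
        rw [hstep, ((ih c).1)]
        by_cases hp : p = "X"
        · rw [show segments (p :: c :: cs) = [] :: segments (c :: cs) from by simp [segments, hp]]
          simp [List.countP_cons, hasDotPair]
        · obtain ⟨h2, t2, hseg2, hsegp⟩ := segments_head?_cons p (c :: cs) hp
          rw [hsegp, hseg2]
          have heq : hasDotPair (p :: h2) = hasDotPair h2 := by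
            apply hasDotPair_cons_of_not
            rintro ⟨hh, hp'⟩
            by_cases hcX : c = "X"
            · rw [show segments (c :: cs) = [] :: segments cs from by simp [segments, hcX]] at hseg2
              cases hseg2; simp at hh
            · obtain ⟨h, t, hseg, hsegc⟩ := segments_head?_cons c cs hcX
              rw [hsegc] at hseg2
              cases hseg2
              simp only [List.head?_cons, Option.some.injEq] at hh
              exact hcp ⟨hh.symm ▸ rfl, hp'⟩
          simp [List.countP_cons, heq]
    · -- counting = false
      by_cases hcX : c = "X"
      · have hstep : gSpec p (c :: cs) false = gSpec c cs true := by
          simp [gSpec, hcX]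
        rw [hstep, (ih c).1]
        subst hcX
        rw [show segments ("X" :: cs) = [] :: segments cs from by simp [segments]]
        simp [List.countP_cons, hasDotPair]
      · have hstep : gSpec p (c :: cs) false = gSpec c cs false := by
          simp [gSpec, hcX]
        obtain ⟨h, t, hseg, hsegc⟩ := segments_head?_cons c cs hcX
        rw [hstep, (ih c).2, hseg, hsegc]
        simp

lemma foldl_cwStep_pairs : ∀ (cs : List String) (p : String) (num : Int) (ct : Bool),
    ((cs.zip (p :: cs)).foldl cwStep (num, ct)).1 = num + gSpec p cs ct := by
  intro cs
  induction cs with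
  | nil => intro p num ct; simp [gSpec]
  | cons c cs ih =>
    intro p num ct
    rw [show ((c :: cs).zip (p :: c :: cs)) = (c, p) :: (cs.zip (c :: cs)) from by simp,
        List.foldl_cons,
        show cwStep (num, ct) (c, p) = ((cwStep (num, ct) (c, p)).1, (cwStep (num, ct) (c, p)).2) from rfl,
        ih]
    simp only [cwStep, gSpec]
    split_ifs <;> simp_all <;> ring

lemma pyGetD_append_length {α : Type} (pre : List α) (y : α) (ys : List α) (d : α) :
    PySem.List.pyGetD (pre ++ y :: ys) (pre.length : Int) d = y := by
  rw [PySem.List.pyGetD_natCast]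
  simp [List.getD, List.getElem?_append_right (Nat.le_refl pre.length)]

lemma foldl_range_pairs : ∀ (cs : List String) (pre : List String) (p : String) (st : Int × Bool),
    (PySem.List.pyRange ((pre.length : Int) + 1) ((pre.length : Int) + 1 + cs.length) 1).foldl
        (fun st j => cwStep st (PySem.List.pyGetD (pre ++ p :: cs) j "",
                                PySem.List.pyGetD (pre ++ p :: cs) (j - 1) "")) st
      = (cs.zip (p :: cs)).foldl cwStep st := by
  intro cs
  induction cs with
  | nil =>
    intro pre p st
    rw [PySem.List.pyRange_one_eq_nil (by simp)]
    simp
  | cons c cs ih =>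
    intro pre p st
    have hb : ((pre.length : Int) + 1) < ((pre.length : Int) + 1 + ((c :: cs).length : Nat)) := by
      simp only [List.length_cons]; push_cast; omega
    rw [PySem.List.pyRange_one_cons hb, List.foldl_cons]
    have hget1 : PySem.List.pyGetD (pre ++ p :: c :: cs) ((pre.length : Int) + 1) "" = c := by
      rw [show pre ++ p :: c :: cs = (pre ++ [p]) ++ c :: cs from by simp,
          show ((pre.length : Int) + 1) = (((pre ++ [p]).length : Nat) : Int) from by simp]
      exact pyGetD_append_length _ _ _ _
    have hget0 : PySem.List.pyGetD (pre ++ p :: c :: cs) ((pre.length : Int) + 1 - 1) "" = p := by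
      rw [show ((pre.length : Int) + 1 - 1) = (pre.length : Int) from by ring]
      exact pyGetD_append_length _ _ _ _
    rw [hget1, hget0]
    have hih := ih (pre ++ [p]) c (cwStep st (c, p))
    rw [show (((pre ++ [p]).length : Nat) : Int) = (pre.length : Int) + 1 from by simp] at hih
    rw [show (pre ++ [p]) ++ c :: cs = pre ++ p :: c :: cs from by simp] at hih
    rw [show ((pre.length : Int) + 1 + 1 + ((cs.length : Nat) : Int))
          = ((pre.length : Int) + 1 + (((c :: cs).length : Nat) : Int)) from by
            simp only [List.length_cons]; push_cast; ring] at hih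
    rw [hih, show ((c :: cs).zip (p :: c :: cs)) = (c, p) :: (cs.zip (c :: cs)) from by simp,
        List.foldl_cons]

lemma foldl_range_pairs0 (cs : List String) (p : String) (st : Int × Bool) :
    (PySem.List.pyRange 1 (1 + cs.length) 1).foldl
        (fun st j => cwStep st (PySem.List.pyGetD (p :: cs) j "",
                                PySem.List.pyGetD (p :: cs) (j - 1) "")) st
      = (cs.zip (p :: cs)).foldl cwStep st := by
  have h := foldl_range_pairs cs [] p st
  simpa using h

lemma pyGetD_take {α : Type} (r : List α) (n : Nat) (i : Int) (d : α)
    (h0 : 0 ≤ i) (hi : i < (n : Int)) (hn : n ≤ r.length) :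
    PySem.List.pyGetD (r.take n) i d = PySem.List.pyGetD r i d := by
  have hlt : i < ((r.take n).length : Int) := by
    rw [List.length_take]; omega
  have hlt2 : i < (r.length : Int) := by omega
  rw [PySem.List.pyGetD_eq_getElem _ d h0 hlt, PySem.List.pyGetD_eq_getElem _ d h0 hlt2]
  exact List.getElem_take

-- A's inner loop over a sufficiently long row equals the segment count of its first-N cells
lemma innerRow (r : List String) (N : Int) (h2 : 2 ≤ N) (hlen : N ≤ (r.length : Int)) (num : Int) :
    ((PySem.List.pyRange 1 N 1).foldl
        (fun st j => cwStep st (PySem.List.pyGetD r j "", PySem.List.pyGetD r (j - 1) ""))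
        (num, true)).1
      = num + (((segments (r.take N.toNat)).countP hasDotPair : Nat) : Int) := by
  set cells := r.take N.toNat with hcells
  have hclen : cells.length = N.toNat := by
    rw [hcells, List.length_take]; omega
  have hcongr : (PySem.List.pyRange 1 N 1).foldl
        (fun st j => cwStep st (PySem.List.pyGetD r j "", PySem.List.pyGetD r (j - 1) ""))
        (num, true)
      = (PySem.List.pyRange 1 N 1).foldl
        (fun st j => cwStep st (PySem.List.pyGetD cells j "", PySem.List.pyGetD cells (j - 1) ""))
        (num, true) := by
    apply (PySem.List.foldl_congr_mem _ _ _ _ ?_).symm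
    intro st j hj
    rw [PySem.List.mem_pyRange_one] at hj
    rw [pyGetD_take r N.toNat j "" (by omega) (by omega) (by omega),
        pyGetD_take r N.toNat (j - 1) "" (by omega) (by omega) (by omega)]
  rw [hcongr]
  obtain ⟨p, cs, hpc⟩ : ∃ p cs, cells = p :: cs := by
    cases hc : cells with
    | nil => rw [hc] at hclen; simp at hclen; omega
    | cons p cs => exact ⟨p, cs, rfl⟩
  have hN : N = (cs.length : Int) + 1 := by
    have hl : cells.length = cs.length + 1 := by rw [hpc]; simp
    omega
  rw [hpc, show PySem.List.pyRange 1 N 1 = PySem.List.pyRange 1 (1 + (cs.length : Nat)) 1 from by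
        congr 1; omega]
  rw [foldl_range_pairs0 cs p (num, true), foldl_cwStep_pairs cs p num true, (gSpec_count cs p).1]

lemma foldl_range_rows {α : Type} : ∀ (n : Nat) (rows pre : List (List α)) (acc : Int)
    (v : List α → Int), n ≤ rows.length →
    (PySem.List.pyRange (pre.length : Int) ((pre.length : Int) + n) 1).foldl
        (fun acc i => acc + v (PySem.List.pyGetD (pre ++ rows) i [])) acc
      = (rows.take n).foldl (fun acc r => acc + v r) acc := by
  intro n
  induction n with
  | zero =>
    intro rows pre acc v _
    rw [show ((pre.length : Int) + ((0 : Nat) : Int)) = (pre.length : Int) from by simp]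
    rw [PySem.List.pyRange_one_eq_nil (le_refl _)]
    simp
  | succ m ih =>
    intro rows pre acc v hn
    cases rows with
    | nil => simp at hn
    | cons r rs =>
      have hb : (pre.length : Int) < ((pre.length : Int) + ((m + 1 : Nat) : Int)) := by push_cast; omega
      rw [PySem.List.pyRange_one_cons hb, List.foldl_cons, pyGetD_append_length]
      have hih := ih rs (pre ++ [r]) (acc + v r) v (by simpa using hn)
      rw [show (pre ++ [r]) ++ rs = pre ++ r :: rs from by simp] at hih
      rw [show (((pre ++ [r]).length : Nat) : Int) = (pre.length : Int) + 1 from by simp] at hih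
      rw [show ((pre.length : Int) + 1 + ((m : Nat) : Int)) = ((pre.length : Int) + ((m + 1 : Nat) : Int)) from by push_cast; ring] at hih
      rw [hih]
      simp

lemma foldl_range_rows0 {α : Type} (n : Nat) (rows : List (List α)) (acc : Int)
    (v : List α → Int) (h : n ≤ rows.length) :
    (PySem.List.pyRange 0 (n : Int) 1).foldl
        (fun acc i => acc + v (PySem.List.pyGetD rows i [])) acc
      = (rows.take n).foldl (fun acc r => acc + v r) acc := by
  have hh := foldl_range_rows n rows [] acc v h
  simpa using hh

-- B's per-row fold counts segments with a dot pair
lemma bRow (row : List String) (N : Int) (hN : 0 ≤ N) (total : Int) :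
    (segsOfRow (PySem.List.slice row (some 0) (some N))).foldl
        (fun t s => if hasDotPair s then t + 1 else t) total
      = total + (((segments (row.take N.toNat)).countP hasDotPair : Nat) : Int) := by
  rw [PySem.List.slice_zero_start, PySem.List.slice_to row hN, segsOfRow_eq,
      PySem.List.foldl_if_add_one]

-- ===== VERDICT (by name: the statement is the Claim_ definition above) =====
theorem countWidth_spec : Claim_equal_countWidth := by
  intro arr N _ hpre
  unfold Spec_countWidth countWidth countWidth_alt
  by_cases hN : N < 2
  · rw [if_pos hN]
    have h1 : PySem.List.pyRange 1 N 1 = [] := PySem.List.pyRange_one_eq_nil (by omega)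
    simp only [h1, List.foldl_nil]
    simp [PySem.List.foldl_ignore]
  · rw [if_neg hN]
    have h2 : 2 ≤ N := by omega
    obtain ⟨hlen1, hlen2⟩ : N ≤ (arr.length : Int) ∧ ∀ r ∈ arr.take N.toNat, N ≤ (r.length : Int) := by
      rcases hpre with h | h
      · omega
      · exact h
    have hbody : (PySem.List.pyRange 0 N 1).foldl
        (fun num i =>
          ((PySem.List.pyRange 1 N 1).foldl
            (fun (st : Int × Bool) j =>
              let counting :=
                if st.2 = false ∧
                    (PySem.List.pyGetD (PySem.List.pyGetD arr i []) j "",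
                     PySem.List.pyGetD (PySem.List.pyGetD arr i []) (j - 1) "").1 = "X" then true
                else st.2
              if counting = true ∧
                  (PySem.List.pyGetD (PySem.List.pyGetD arr i []) j "",
                   PySem.List.pyGetD (PySem.List.pyGetD arr i []) (j - 1) "").1 = "." ∧
                  (PySem.List.pyGetD (PySem.List.pyGetD arr i []) j "",
                   PySem.List.pyGetD (PySem.List.pyGetD arr i []) (j - 1) "").2 = "." then
                (st.1 + 1, false)
              else (st.1, counting))
            (num, true)).1) 0
        = (PySem.List.pyRange 0 N 1).foldl
            (fun num i => num +
              (((segments ((PySem.List.pyGetD arr i []).take N.toNat)).countP hasDotPair : Nat) : Int)) 0 := by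
      apply PySem.List.foldl_congr_mem
      intro num i hi
      rw [PySem.List.mem_pyRange_one] at hi
      obtain ⟨hi0, hiN⟩ := hi
      have hrow : PySem.List.pyGetD arr i [] ∈ arr.take N.toNat := by
        have hi2 : i < (arr.length : Int) := by omega
        rw [PySem.List.pyGetD_eq_getElem arr [] hi0 hi2]
        have hlt : i.toNat < (arr.take N.toNat).length := by
          rw [List.length_take]; omega
        rw [← List.getElem_take (h := hlt)]
        exact List.getElem_mem hlt
      exact innerRow (PySem.List.pyGetD arr i []) N h2 (hlen2 _ hrow) num
    rw [hbody]
    rw [show PySem.List.pyRange 0 N 1 = PySem.List.pyRange 0 ((N.toNat : Nat) : Int) 1 from by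
          congr 1; omega]
    rw [foldl_range_rows0 N.toNat arr 0
          (fun r => (((segments (r.take N.toNat)).countP hasDotPair : Nat) : Int)) (by omega)]
    rw [PySem.List.slice_zero_start, PySem.List.slice_to arr (by omega : (0:Int) ≤ N)]
    symm
    apply PySem.List.foldl_congr_mem
    intro total row _
    exact bRow row N (by omega) total
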